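-- pv_equiv track=rewrite | github.com/Ragna-X/CodingChallenges | 프로그래머스/0/120884. 치킨 쿠폰/치킨 쿠폰.py | solution
-- ===== SOURCE A (Python) =====
-- def solution(chicken):
--     total_bonus_chicken = 0
--     coupon = chicken
--
--     while coupon >= 10:
--         coupon_chicken = coupon // 10
--         total_bonus_chicken += coupon_chicken
--         coupon = coupon % 10 + coupon_chicken
--
--     return total_bonus_chicken
-- ===== SOURCE B (Python) =====
-- def solution(chicken):
--     return (chicken - 1) // 9 if chicken >= 1 else 0
-- ===== Notes on version B (the rewrite author's own statement) =====
-- stated objective: simpler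
-- what changed: Replaced the while-loop coupon simulation with a one-line constant-time arithmetic closed form (zero for non-positive input).
import Mathlib
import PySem

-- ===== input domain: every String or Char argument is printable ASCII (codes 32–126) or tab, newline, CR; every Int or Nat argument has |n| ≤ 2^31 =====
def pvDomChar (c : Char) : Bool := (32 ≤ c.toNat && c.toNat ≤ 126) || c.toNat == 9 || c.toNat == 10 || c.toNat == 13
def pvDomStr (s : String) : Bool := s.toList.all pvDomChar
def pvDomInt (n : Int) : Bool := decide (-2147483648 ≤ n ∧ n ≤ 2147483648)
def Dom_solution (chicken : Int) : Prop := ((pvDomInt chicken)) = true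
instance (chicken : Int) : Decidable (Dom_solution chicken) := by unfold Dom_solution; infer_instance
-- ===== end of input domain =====

-- B replaces A's while-loop coupon simulation with a one-line arithmetic closed form (zero for non-positive input): simpler, no iteration.

-- ===== PORT A =====
-- the while loop of A, state = (total_bonus_chicken, coupon)
def solutionLoop (total coupon : Int) : Int :=
  if h : coupon ≥ 10 then
    solutionLoop (total + PySem.Int.floordiv coupon 10)
      (PySem.Int.mod coupon 10 + PySem.Int.floordiv coupon 10)
  else total
termination_by coupon.toNat
decreasing_by
  have h10 : (0:Int) < 10 := by omega
  rw [PySem.Int.floordiv_eq_ediv_of_pos h10, PySem.Int.mod_eq_emod_of_pos h10]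
  omega

def solution (chicken : Int) : Int := solutionLoop 0 chicken

-- ===== PORT B =====
def solution_alt (chicken : Int) : Int :=
  if chicken ≥ 1 then PySem.Int.floordiv (chicken - 1) 9 else 0

-- ===== PRECONDITION & SPEC =====
def Spec_solution (chicken : Int) (out : Int) : Prop := out = solution_alt chicken
instance (chicken : Int) (out : Int) : Decidable (Spec_solution chicken out) := by unfold Spec_solution; infer_instance

-- ===== CLAIM (what is proved, stated in full; the proofs are below) =====
def Claim_equal_solution : Prop := ∀ (chicken : Int), Dom_solution chicken → Spec_solution chicken (solution chicken)

-- ===== LEMMAS AND PROOFS =====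

theorem solutionLoop_eq (n : Nat) : ∀ (total coupon : Int), coupon.toNat ≤ n →
    solutionLoop total coupon = total + solution_alt coupon := by
  induction n with
  | zero =>
    intro total coupon hc
    have hle : coupon ≤ 0 := by omega
    rw [solutionLoop]
    simp only [solution_alt]
    rw [dif_neg (by omega), if_neg (by omega)]
    omega
  | succ n ih =>
    intro total coupon hc
    rw [solutionLoop]
    by_cases h : coupon ≥ 10
    · rw [dif_pos h]
      have h10 : (0:Int) < 10 := by omega
      have h9 : (0:Int) < 9 := by omega
      rw [PySem.Int.floordiv_eq_ediv_of_pos h10, PySem.Int.mod_eq_emod_of_pos h10]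
      have hlt : (coupon % 10 + coupon / 10).toNat ≤ n := by omega
      rw [ih _ _ hlt]
      simp only [solution_alt]
      rw [PySem.Int.floordiv_eq_ediv_of_pos h9, PySem.Int.floordiv_eq_ediv_of_pos h9,
        if_pos (by omega : coupon % 10 + coupon / 10 ≥ 1), if_pos (by omega : coupon ≥ 1)]
      omega
    · rw [dif_neg h]
      simp only [solution_alt]
      by_cases h1 : coupon ≥ 1
      · rw [if_pos h1]
        have h9 : (0:Int) < 9 := by omega
        rw [PySem.Int.floordiv_eq_ediv_of_pos h9]
        omega
      · rw [if_neg h1]; omega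

-- ===== VERDICT (by name: the statement is the Claim_ definition above) =====
theorem solution_spec : Claim_equal_solution := by
  intro chicken _
  unfold Spec_solution solution
  rw [solutionLoop_eq chicken.toNat 0 chicken (le_refl _)]
  omega
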